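-- pv_equiv track=rewrite | github.com/erick-santos-8/projetos_python_unb_ed | Python/projeto.py | ponto
-- ===== SOURCE A (Python) =====
-- def ponto(x):
--     pon = False
--     cont = 0
--     x = x.replace(" ", "")
--     for i in range(len(x)):
--         if pon == True:
--             cont+=1
--         if x[i] == ".":
--             pon = True
--     return cont
-- ===== SOURCE B (Python) =====
-- def ponto(x):
--     x = x.replace(" ", "")
--     parts = x.split(".", 1)
--     return len(parts[1]) if len(parts) == 2 else 0
-- ===== Notes on version B (the rewrite author's own statement) =====
-- stated objective: simpler
-- what changed: Replaces the flag-gated counting loop with a locate-then-measure decomposition: split once on the first dot and return the length of the tail (0 if there is no dot).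
import Mathlib
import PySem

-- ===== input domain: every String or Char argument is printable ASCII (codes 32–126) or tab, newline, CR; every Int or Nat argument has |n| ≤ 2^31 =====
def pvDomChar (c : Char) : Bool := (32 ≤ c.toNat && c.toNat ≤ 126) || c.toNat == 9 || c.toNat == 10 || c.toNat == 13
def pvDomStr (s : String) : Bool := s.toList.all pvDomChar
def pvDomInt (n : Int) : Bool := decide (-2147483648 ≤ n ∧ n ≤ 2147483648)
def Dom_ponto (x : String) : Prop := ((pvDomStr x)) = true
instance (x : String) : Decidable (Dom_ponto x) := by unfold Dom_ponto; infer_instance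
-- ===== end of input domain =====

-- B replaces A's flag-gated counting loop by split-on-first-dot-then-measure-the-tail (simpler; same cost).

-- ===== PORT A =====
-- the for-loop over the characters of the space-stripped string, with flag `pon` and counter `cont`
def pontoLoopA : Bool → Int → List Char → Int
  | _, cont, [] => cont
  | pon, cont, c :: rest =>
      let cont' := if pon then cont + 1 else cont
      let pon' := if c = '.' then true else pon
      pontoLoopA pon' cont' rest

def ponto (x : String) : Int :=
  pontoLoopA false 0 (PySem.Chars.replace x.toList [' '] [])

-- ===== PORT B =====
def ponto_alt (x : String) : Int :=
  let y := PySem.Chars.replace x.toList [' '] []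
  let parts := PySem.Chars.splitOnMax y ['.'] 1
  if parts.length = 2 then ((parts.getD 1 []).length : Int) else 0

-- ===== PRECONDITION & SPEC =====
def Spec_ponto (x : String) (out : Int) : Prop := out = ponto_alt x
instance (x : String) (out : Int) : Decidable (Spec_ponto x out) := by unfold Spec_ponto; infer_instance

-- ===== CLAIM (what is proved, stated in full; the proofs are below) =====
def Claim_equal_ponto : Prop := ∀ (x : String), Dom_ponto x → Spec_ponto x (ponto x)

-- ===== LEMMAS AND PROOFS =====

-- A-side: once the flag is set, the loop just adds the remaining length
lemma pontoLoopA_true (l : List Char) (cont : Int) :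
    pontoLoopA true cont l = cont + l.length := by
  induction l generalizing cont with
  | nil => simp [pontoLoopA]
  | cons c rest ih => simp [pontoLoopA, ih]; ring

-- A-side characterisation: the loop counts the characters after the first dot
lemma pontoLoopA_false (l : List Char) (cont : Int) :
    pontoLoopA false cont l =
      cont + (if '.' ∈ l then (((l.dropWhile (· ≠ '.')).tail).length : Int) else 0) := by
  induction l generalizing cont with
  | nil => simp [pontoLoopA]
  | cons c rest ih =>
    by_cases hc : c = '.'
    · subst hc
      simp [pontoLoopA, pontoLoopA_true, List.dropWhile]
    · have hc' : ¬('.' = c) := fun e => hc e.symm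
      simp [pontoLoopA, hc, hc', ih, List.dropWhile]

-- B-side: with maxsplit = 0 remaining, go just closes the current piece
lemma go_zero (sep : List Char) (fuel : Nat) (l cur : List Char)
    (acc acc' : List (List Char)) (h : acc' = acc.reverse) :
    PySem.Chars.splitOnMax.go sep fuel 0 l cur acc = acc' ++ [cur.reverse ++ l] := by
  subst h
  cases fuel with
  | zero => show ((cur.reverse ++ l) :: acc).reverse = _; simp
  | succ f =>
    cases l with
    | nil => show (cur.reverse :: acc).reverse = _; simp
    | cons c rest => show ((cur.reverse ++ (c :: rest)) :: acc).reverse = _; simp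

-- B-side characterisation of go for sep = ['.'], maxsplit = 1
lemma go_one (l : List Char) (fuel : Nat) (cur : List Char)
    (acc acc' : List (List Char)) (hacc : acc' = acc.reverse) (h : l.length < fuel) :
    PySem.Chars.splitOnMax.go ['.'] fuel 1 l cur acc =
      acc' ++ (if '.' ∈ l
        then [cur.reverse ++ l.takeWhile (· ≠ '.'), (l.dropWhile (· ≠ '.')).tail]
        else [cur.reverse ++ l]) := by
  subst hacc
  induction l generalizing fuel cur acc with
  | nil =>
    cases fuel with
    | zero => omega
    | succ f => show (cur.reverse :: acc).reverse = _; simp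
  | cons c rest ih =>
    cases fuel with
    | zero => omega
    | succ f =>
      by_cases hc : c = '.'
      · subst hc
        have : PySem.Chars.splitOnMax.go ['.'] (f + 1) 1 ('.' :: rest) cur acc
            = PySem.Chars.splitOnMax.go ['.'] f 0 rest [] (cur.reverse :: acc) := by
          have step : PySem.Chars.splitOnMax.go ['.'] (f + 1) 1 ('.' :: rest) cur acc
              = if List.isPrefixOf ['.'] ('.' :: rest)
                then PySem.Chars.splitOnMax.go ['.'] f 0 (('.' :: rest).drop 1) [] (cur.reverse :: acc)
                else PySem.Chars.splitOnMax.go ['.'] f 1 rest ('.' :: cur) acc := rfl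
          rw [step]; simp [List.isPrefixOf]
        rw [this, go_zero ['.'] f rest [] (cur.reverse :: acc)
              (acc.reverse ++ [cur.reverse]) (by simp)]
        simp [List.takeWhile, List.dropWhile]
      · have hc' : ¬('.' = c) := fun e => hc e.symm
        have : PySem.Chars.splitOnMax.go ['.'] (f + 1) 1 (c :: rest) cur acc
            = PySem.Chars.splitOnMax.go ['.'] f 1 rest (c :: cur) acc := by
          have step : PySem.Chars.splitOnMax.go ['.'] (f + 1) 1 (c :: rest) cur acc
              = if List.isPrefixOf ['.'] (c :: rest)
                then PySem.Chars.splitOnMax.go ['.'] f 0 ((c :: rest).drop 1) [] (cur.reverse :: acc)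
                else PySem.Chars.splitOnMax.go ['.'] f 1 rest (c :: cur) acc := rfl
          rw [step]; simp [List.isPrefixOf, hc']
        rw [this, ih f (c :: cur) acc (by simp at h ⊢; omega)]
        simp [List.takeWhile, List.dropWhile, hc, hc']

lemma splitOnMax_dot_one (l : List Char) :
    PySem.Chars.splitOnMax l ['.'] 1 =
      if '.' ∈ l
        then [l.takeWhile (· ≠ '.'), (l.dropWhile (· ≠ '.')).tail]
        else [l] := by
  unfold PySem.Chars.splitOnMax
  rw [if_neg (by norm_num)]
  have h1 : (1 : Int).toNat = 1 := rfl
  rw [h1, go_one l (l.length + 1) [] [] [] (by simp) (by omega)]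
  simp

-- ===== VERDICT (by name: the statement is the Claim_ definition above) =====
theorem ponto_spec : Claim_equal_ponto := by
  intro x _
  simp only [Spec_ponto, ponto, ponto_alt, splitOnMax_dot_one, pontoLoopA_false]
  by_cases h : '.' ∈ PySem.Chars.replace x.toList [' '] [] <;> simp [h]
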